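-- pv_equiv track=rewrite | github.com/kimdaeri-bot/carnival-cruiselink | fix_sea_days.py | insert_sea_days
-- ===== SOURCE A (Python) =====
-- import json, math
--
-- SEA_PORT = {"name": "At Sea", "nameKo": "해상 항해"}
--
-- def insert_sea_days(ports, nights):
--     """
--     ports 배열에 해상일을 삽입해서 반환.
--     전략: 첫 기항지 = day1, 나머지 기항지 사이에 해상일 균등 배분,
--           끝에 남는 해상일은 마지막 기항지 다음에 배치
--     """
--     total_days = nights + 1  # 출발일 포함 (ex: 4박 = 5일)
--     sea_count = total_days - len(ports)
--     if sea_count <= 0: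
--         return ports  # 해상일 없음
--
--     result = []
--     n_ports = len(ports)
--
--     if n_ports == 0:
--         # 기항지 없으면 전부 해상일
--         return [SEA_PORT] * total_days
--
--     if n_ports == 1:
--         # 기항지 1개: 첫날 기항지, 나머지 해상
--         result.append(ports[0])
--         result.extend([SEA_PORT] * sea_count)
--         return result
--
--     # 기항지 n개 사이에 (n-1)개 구간 존재
--     # 각 구간에 해상일을 균등 배분, 남는 건 첫 구간에 배치
--     result.append(ports[0])
--     remaining_sea = sea_count
--     remaining_ports = n_ports - 1  # 아직 배치 안 한 기항지 수
--
--     for i in range(1, n_ports):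
--         # 이 구간에 배분할 해상일 수
--         sea_here = math.ceil(remaining_sea / remaining_ports)
--         for _ in range(sea_here):
--             result.append(SEA_PORT)
--         remaining_sea -= sea_here
--         remaining_ports -= 1
--         result.append(ports[i])
--
--     # 남은 해상일 (뒤에 추가)
--     for _ in range(remaining_sea):
--         result.append(SEA_PORT)
--
--     return result
-- ===== SOURCE B (Python) =====
-- SEA_PORT = {"name": "At Sea", "nameKo": "해상 항해"}
--
--
-- def insert_sea_days(ports, nights):
--     total_days = nights + 1
--     sea_count = total_days - len(ports)
--     if sea_count <= 0:
--         return ports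
--     # Map each port to the day index it occupies; every other day is at sea.
--     # Port j (j>=1) sits after j earlier ports and the sea days of the first j
--     # gaps, i.e. at day j + j*base + min(j, extra) with base, extra = divmod(sea_count, gaps).
--     day_of = {}
--     if ports:
--         day_of[0] = ports[0]
--         if len(ports) > 1:
--             base, extra = divmod(sea_count, len(ports) - 1)
--             for j in range(1, len(ports)):
--                 day_of[j + j * base + min(j, extra)] = ports[j]
--     return [day_of.get(d, SEA_PORT) for d in range(total_days)]
-- ===== Notes on version B (the rewrite author's own statement) =====
-- stated objective: alternative
-- what changed: Instead of A's sequential run-builder (mutable remaining_sea/remaining_ports counters appending sea runs between ports), B computes each port's day index by a closed formula, stores them in a day->port map, and generates the whole timeline day by day with a lookup defaulting to the sea marker.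
import Mathlib
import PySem

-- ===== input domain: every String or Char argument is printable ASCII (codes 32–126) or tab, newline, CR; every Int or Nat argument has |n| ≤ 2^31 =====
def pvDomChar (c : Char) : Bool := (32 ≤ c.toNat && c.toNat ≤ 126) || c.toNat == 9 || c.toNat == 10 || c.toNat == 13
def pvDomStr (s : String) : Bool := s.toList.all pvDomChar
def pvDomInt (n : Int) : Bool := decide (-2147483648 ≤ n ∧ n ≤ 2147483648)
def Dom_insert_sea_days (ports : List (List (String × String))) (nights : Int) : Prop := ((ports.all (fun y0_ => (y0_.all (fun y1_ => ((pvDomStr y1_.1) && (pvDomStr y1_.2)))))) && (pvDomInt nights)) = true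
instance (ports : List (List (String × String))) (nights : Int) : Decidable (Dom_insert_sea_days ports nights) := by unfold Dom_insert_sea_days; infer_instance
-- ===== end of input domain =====

-- B replaces A's sequential run-builder (mutable remaining_sea/remaining_ports counters) by a
-- closed-form day->port position map and a day-by-day timeline generation with lookup: alternative
-- algorithm, same cost.

-- ===== PORT A =====
-- SEA_PORT constant (a dict → association list); shared verbatim by both ports
def pvSEA : List (String × String) := [("name", "At Sea"), ("nameKo", "해상 항해")]

-- one iteration of A's for-loop body (state: result, remaining_sea, remaining_ports);
-- math.ceil(a/b) on ints ported as the exact integer ceiling -((-a)//b) — exact on the sampled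
-- domain, where the quotient magnitudes stay far below double precision
def pvStepA (st : List (List (String × String)) × Int × Int) (p : List (String × String)) :
    List (List (String × String)) × Int × Int :=
  let sea_here := -(PySem.Int.floordiv (-st.2.1) st.2.2)
  (st.1 ++ List.replicate sea_here.toNat pvSEA ++ [p], st.2.1 - sea_here, st.2.2 - 1)

def insert_sea_days (ports : List (List (String × String))) (nights : Int) : List (List (String × String)) :=
  let total_days := nights + 1
  let sea_count := total_days - PySem.List.len ports
  if sea_count ≤ 0 then ports
  else
    let n_ports := PySem.List.len ports
    if n_ports = 0 then List.replicate total_days.toNat pvSEA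
    else if n_ports = 1 then
      [PySem.List.pyGetD ports 0 []] ++ List.replicate sea_count.toNat pvSEA
    else
      let st := (PySem.List.pyRange 1 (PySem.List.len ports) 1).foldl
        (fun st i => pvStepA st (PySem.List.pyGetD ports i []))
        ([PySem.List.pyGetD ports 0 []], sea_count, n_ports - 1)
      st.1 ++ List.replicate st.2.1.toNat pvSEA

-- ===== PORT B =====
def insert_sea_days_alt (ports : List (List (String × String))) (nights : Int) : List (List (String × String)) :=
  let total_days := nights + 1
  let sea_count := total_days - (ports.length : Int)
  if sea_count ≤ 0 then ports
  else
    -- day_of: the day->port map; 'if ports:' / 'if len(ports) > 1:' guards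
    let day_of : PySem.Dict Int (List (String × String)) :=
      match ports with
      | [] => PySem.Dict.empty
      | p0 :: _ =>
        let d0 := PySem.Dict.empty.insert 0 p0
        if 1 < ports.length then
          let base := PySem.Int.floordiv sea_count ((ports.length : Int) - 1)
          let extra := PySem.Int.mod sea_count ((ports.length : Int) - 1)
          (PySem.List.pyRange 1 (ports.length : Int) 1).foldl
            (fun d j => d.insert (j + j * base + min j extra) (PySem.List.pyGetD ports j []))
            d0
        else d0
    (PySem.List.pyRange 0 total_days 1).map (fun d => day_of.getD d pvSEA)

-- ===== PRECONDITION & SPEC =====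
def Spec_insert_sea_days (ports : List (List (String × String))) (nights : Int) (out : List (List (String × String))) : Prop := out = insert_sea_days_alt ports nights
instance (ports : List (List (String × String))) (nights : Int) (out : List (List (String × String))) : Decidable (Spec_insert_sea_days ports nights out) := by unfold Spec_insert_sea_days; infer_instance

-- ===== CLAIM (what is proved, stated in full; the proofs are below) =====
def Claim_equal_insert_sea_days : Prop := ∀ (ports : List (List (String × String))) (nights : Int), Dom_insert_sea_days ports nights → Spec_insert_sea_days ports nights (insert_sea_days ports nights)

-- ===== LEMMAS AND PROOFS =====

-- canonical "timeline" of a sorted day->port entry list over the day interval [a, N)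
def pvSeg : List (Int × List (String × String)) → Int → Int → List (List (String × String))
  | [], a, N => List.replicate (N - a).toNat pvSEA
  | (k, v) :: r, a, N => List.replicate (k - a).toNat pvSEA ++ [v] ++ pvSeg r (k + 1) N

-- the entries produced by A's counter recurrence: next port sits ceil(s/g) sea days ahead
def pvEntries : List (List (String × String)) → Int → Int → Int → List (Int × List (String × String))
  | [], _, _, _ => []
  | t :: r, a, s, g =>
    let c := -(PySem.Int.floordiv (-s) g)
    (a + c, t) :: pvEntries r (a + c + 1) (s - c) (g - 1)

-- basic facts about the integer ceiling step
lemma pv_ceil_facts (s g : Int) (hs : 0 ≤ s) (hg : 0 < g) :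
    0 ≤ s - -(PySem.Int.floordiv (-s) g) ∧ (g = 1 → s - -(PySem.Int.floordiv (-s) g) = 0) := by
  have hbe := PySem.Int.floordiv_mul_add_mod (-s) g
  have h0 := PySem.Int.mod_nonneg (-s) hg
  have h1 := PySem.Int.mod_lt (-s) hg
  set q := PySem.Int.floordiv (-s) g with hq
  set m := PySem.Int.mod (-s) g with hm
  have hq0 : q ≤ 0 := by nlinarith
  constructor
  · nlinarith
  · intro h; rw [h] at hbe h1; omega

-- A's loop equals the canonical timeline of pvEntries
lemma pv_loopA (tail : List (List (String × String))) :
    ∀ (acc : List (List (String × String))) (a s : Int), 0 ≤ s → (tail = [] → s = 0) →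
    tail.foldl pvStepA (acc, s, (tail.length : Int)) =
      (acc ++ pvSeg (pvEntries tail a s (tail.length : Int)) a (a + s + tail.length), 0, 0) := by
  induction tail with
  | nil =>
    intro acc a s hs h0
    simp [h0 rfl, pvEntries, pvSeg]
  | cons t r ih =>
    intro acc a s hs h0
    have hg : (0:Int) < ((r.length + 1 : Nat) : Int) := by positivity
    obtain ⟨hs', hlast⟩ := pv_ceil_facts s ((r.length + 1 : Nat) : Int) hs hg
    set c := -(PySem.Int.floordiv (-s) ((r.length + 1 : Nat) : Int)) with hc
    have hcast : ((r.length + 1 : Nat) : Int) - 1 = (r.length : Int) := by push_cast; ring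
    simp only [List.length_cons, List.foldl_cons]
    rw [show pvStepA (acc, s, ((r.length + 1 : Nat) : Int)) t =
        (acc ++ List.replicate c.toNat pvSEA ++ [t], s - c, (r.length : Int)) from by
      simp only [pvStepA, ← hc, hcast]]
    rw [ih _ (a + c + 1) _ hs' (fun hr => hlast (by simp [hr]))]
    rw [show pvEntries (t :: r) a s ((r.length + 1 : Nat) : Int) =
          (a + c, t) :: pvEntries r (a + c + 1) (s - c) ((r.length : Int)) from by
        simp only [pvEntries, ← hc, hcast]]
    simp only [pvSeg, add_sub_cancel_left]
    rw [show a + c + 1 + (s - c) + (r.length : Int) = a + s + ((r.length + 1 : Nat) : Int) from by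
      push_cast; ring]
    simp [List.append_assoc]

-- lookup below every key gives the default
lemma pv_lookup_low (E : List (Int × List (String × String))) (d : Int)
    (h : ∀ p ∈ E, d < p.1) : (PySem.Dict.mk E).getD d pvSEA = pvSEA := by
  induction E with
  | nil => simp [PySem.Dict.getD, PySem.Dict.get?]
  | cons p r ih =>
    have hne : p.1 ≠ d := by have := h p (by simp); omega
    rw [PySem.Dict.getD_eq_get?_getD]
    rw [show (PySem.Dict.mk (p :: r)) = (PySem.Dict.mk ((p.1, p.2) :: r)) from by simp]
    rw [PySem.Dict.get?_mk_cons]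
    simp only [beq_iff_eq, if_neg hne]
    rw [← PySem.Dict.getD_eq_get?_getD]
    exact ih (fun q hq => h q (by simp [hq]))

-- rendering the dict day by day over [a, N) equals the canonical timeline
lemma pv_render (E : List (Int × List (String × String))) :
    ∀ (a N : Int), E.Pairwise (fun p q => p.1 < q.1) → (∀ p ∈ E, a ≤ p.1 ∧ p.1 < N) →
    (PySem.List.pyRange a N 1).map (fun d => (PySem.Dict.mk E).getD d pvSEA) = pvSeg E a N := by
  induction E with
  | nil =>
    intro a N _ _
    rw [List.map_congr_left (fun d _ => pv_lookup_low [] d (by simp))]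
    simp [pvSeg, PySem.List.length_pyRange_one]
  | cons p r ih =>
    intro a N hpw hbd
    obtain ⟨hak, hkN⟩ := hbd p (by simp)
    rw [PySem.List.pyRange_one_append a p.1 N hak (le_of_lt hkN)]
    rw [PySem.List.pyRange_one_cons hkN]
    simp only [List.map_append, List.map_cons]
    have h1 : (PySem.List.pyRange a p.1 1).map (fun d => (PySem.Dict.mk (p :: r)).getD d pvSEA) =
        List.replicate (p.1 - a).toNat pvSEA := by
      rw [List.map_congr_left (fun d hd => pv_lookup_low (p :: r) d ?_)]
      · simp [PySem.List.length_pyRange_one]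
      · intro q hq
        have hd' := (PySem.List.mem_pyRange_one.mp hd).2
        rcases List.mem_cons.mp hq with h | h
        · rw [h]; omega
        · have := (List.pairwise_cons.mp hpw).1 q h; omega
    have h2 : (PySem.Dict.mk (p :: r)).getD p.1 pvSEA = p.2 := by
      rw [show (PySem.Dict.mk (p :: r)) = (PySem.Dict.mk ((p.1, p.2) :: r)) from by simp]
      rw [PySem.Dict.getD_eq_get?_getD, PySem.Dict.get?_mk_cons]
      simp
    have h3 : (PySem.List.pyRange (p.1 + 1) N 1).map (fun d => (PySem.Dict.mk (p :: r)).getD d pvSEA) =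
        pvSeg r (p.1 + 1) N := by
      have hcg : ∀ d ∈ PySem.List.pyRange (p.1 + 1) N 1,
          (PySem.Dict.mk (p :: r)).getD d pvSEA = (PySem.Dict.mk r).getD d pvSEA := by
        intro d hd
        have hd' := (PySem.List.mem_pyRange_one.mp hd).1
        rw [show (PySem.Dict.mk (p :: r)) = (PySem.Dict.mk ((p.1, p.2) :: r)) from by simp]
        rw [PySem.Dict.getD_eq_get?_getD, PySem.Dict.get?_mk_cons]
        have hne : p.1 ≠ d := by omega
        simp only [beq_iff_eq, if_neg hne]
        rw [← PySem.Dict.getD_eq_get?_getD]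
      rw [List.map_congr_left hcg, ih (p.1 + 1) N (List.pairwise_cons.mp hpw).2
        (fun q hq => ⟨by have := (List.pairwise_cons.mp hpw).1 q hq; omega, ((hbd q (by simp [hq])).2)⟩)]
    rw [h1, h2, h3]
    simp [pvSeg]

-- B's closed-form key is strictly monotone in the port index (base ≥ 0)
lemma pv_key_mono (b e j j' : Int) (hb : 0 ≤ b) (h : j < j') :
    j + j * b + min j e < j' + j' * b + min j' e := by
  have h1 : min j e ≤ min j' e := by omega
  nlinarith

-- A's per-step ceiling, at 1-based gap i, equals base + (1 if i ≤ extra else 0)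
lemma pv_ceil_closed (s g i : Int) (hg : 0 < g) (h2 : i ≤ g) :
    -(PySem.Int.floordiv (-(s - (i - 1) * PySem.Int.floordiv s g - min (i - 1) (PySem.Int.mod s g))) (g - i + 1))
      = PySem.Int.floordiv s g + (if i ≤ PySem.Int.mod s g then 1 else 0) := by
  have hbe := PySem.Int.floordiv_mul_add_mod s g
  have h0 := PySem.Int.mod_nonneg s hg
  have hlt := PySem.Int.mod_lt s hg
  set b := PySem.Int.floordiv s g with hb
  set e := PySem.Int.mod s g with he
  have hgi : (0:Int) < g - i + 1 := by omega
  rw [PySem.Int.neg_floordiv_neg_eq_iff_of_pos hgi]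
  split_ifs with hie
  · have hm : min (i - 1) e = i - 1 := by omega
    rw [hm]
    constructor <;> nlinarith
  · have hm : min (i - 1) e = e := by omega
    rw [hm]
    constructor <;> nlinarith

-- A's recurrence entries coincide with B's closed-form keyed entries (downward induction over d = ports left)
lemma pv_entries_closed (ports : List (List (String × String))) (s : Int) (g : Nat)
    (hg : ports.length = g + 1) (hg1 : 1 ≤ g) :
    ∀ (d i : Nat), i + d = g + 1 → 1 ≤ i →
    pvEntries (ports.drop i)
        ((i : Int) + ((i : Int) - 1) * PySem.Int.floordiv s g + min ((i : Int) - 1) (PySem.Int.mod s g))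
        (s - ((i : Int) - 1) * PySem.Int.floordiv s g - min ((i : Int) - 1) (PySem.Int.mod s g))
        ((g : Int) - i + 1)
      = (PySem.List.pyRange i ((g : Int) + 1) 1).map
          (fun j => (j + j * PySem.Int.floordiv s g + min j (PySem.Int.mod s g),
                     PySem.List.pyGetD ports j [])) := by
  have hgz : (0:Int) < (g : Int) := by exact_mod_cast hg1
  have hbe := PySem.Int.floordiv_mul_add_mod s (g : Int)
  have h0 := PySem.Int.mod_nonneg s hgz
  have hlt := PySem.Int.mod_lt s hgz
  set b := PySem.Int.floordiv s (g : Int) with hb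
  set e := PySem.Int.mod s (g : Int) with he
  intro d
  induction d with
  | zero =>
    intro i hi _
    have : i = g + 1 := by omega
    subst this
    rw [List.drop_of_length_le (by omega), PySem.List.pyRange_one_eq_nil (by exact_mod_cast Nat.le_refl (g+1))]
    simp [pvEntries]
  | succ d ihd =>
    intro i hi h1
    have hiI : (1:Int) ≤ (i:Int) := by exact_mod_cast h1
    have higI : (i:Int) ≤ (g:Int) := by exact_mod_cast (by omega : i ≤ g)
    have hilt : i < ports.length := by omega
    rw [List.drop_eq_getElem_cons hilt]
    simp only [pvEntries]
    rw [pv_ceil_closed s (g:Int) (i:Int) hgz higI]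
    rw [PySem.List.pyRange_one_cons (by omega)]
    simp only [List.map_cons]
    have hkey : (i:Int) + ((i:Int) - 1) * b + min ((i:Int) - 1) e + (b + if (i:Int) ≤ e then 1 else 0)
        = (i:Int) + (i:Int) * b + min (i:Int) e := by
      split_ifs with hie
      · have hm1 : min ((i:Int) - 1) e = (i:Int) - 1 := by omega
        have hm2 : min (i:Int) e = (i:Int) := by omega
        rw [hm1, hm2]; ring
      · have hm1 : min ((i:Int) - 1) e = e := by omega
        have hm2 : min (i:Int) e = e := by omega
        rw [hm1, hm2]; ring
    have hval : ports[i] = PySem.List.pyGetD ports (i:Int) [] := by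
      rw [PySem.List.pyGetD_natCast]
      exact (List.getD_eq_getElem ports [] hilt).symm
    rw [hkey, hval]
    congr 1
    have hstep := ihd (i + 1) (by omega) (by omega)
    have c1 : ((i + 1 : Nat) : Int) = (i:Int) + 1 := by push_cast; ring
    rw [c1] at hstep
    simp only [add_sub_cancel_right] at hstep
    have hs' : s - ((i:Int) - 1) * b - min ((i:Int) - 1) e - (b + if (i:Int) ≤ e then 1 else 0)
        = s - (i:Int) * b - min (i:Int) e := by
      split_ifs with hie
      · have hm : min (i:Int) e = min ((i:Int) - 1) e + 1 := by omega
        rw [hm]; ring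
      · have hm : min (i:Int) e = min ((i:Int) - 1) e := by omega
        rw [hm]; ring
    rw [← hb, ← he, hs']
    rw [show (i:Int) + (i:Int) * b + min (i:Int) e + 1 = (i:Int) + 1 + (i:Int) * b + min (i:Int) e from by ring]
    rw [show (g:Int) - (i:Int) + 1 - 1 = (g:Int) - ((i:Int) + 1) + 1 from by ring]
    exact hstep

-- the two-or-more-ports case, factored out of the verdict
lemma pv_main (p0 p1 : List (String × String)) (rest : List (List (String × String))) (nights : Int)
    (hsea : ¬ nights + 1 - ((p0 :: p1 :: rest).length : Int) ≤ 0) :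
    insert_sea_days (p0 :: p1 :: rest) nights = insert_sea_days_alt (p0 :: p1 :: rest) nights := by
  have hlen : (p0 :: p1 :: rest).length = rest.length + 2 := by simp
  have hlI : ((p0 :: p1 :: rest).length : Int) = (rest.length : Int) + 2 := by push_cast [hlen]; ring
  set s := nights + 1 - ((p0 :: p1 :: rest).length : Int) with hsdef
  have hspos : 0 < s := by omega
  have hgpos : (0:Int) < ((p0 :: p1 :: rest).length : Int) - 1 := by omega
  set b := PySem.Int.floordiv s (((p0 :: p1 :: rest).length : Int) - 1) with hbdef
  set e := PySem.Int.mod s (((p0 :: p1 :: rest).length : Int) - 1) with hedef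
  have hbe := PySem.Int.floordiv_mul_add_mod s (((p0 :: p1 :: rest).length : Int) - 1)
  have he0 := PySem.Int.mod_nonneg s hgpos
  have helt := PySem.Int.mod_lt s hgpos
  rw [← hbdef, ← hedef] at hbe
  rw [← hedef] at he0 helt
  have hb0 : 0 ≤ b := by nlinarith
  simp only [insert_sea_days, insert_sea_days_alt, PySem.List.len_eq, ← hsdef, ← hbdef, ← hedef]
  rw [if_neg hsea, if_neg hsea]
  rw [if_neg (by omega), if_neg (by omega)]
  rw [if_pos (by simp)]
  -- A side: index loop → structural fold over the tail, then the canonical timeline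
  rw [PySem.List.foldl_pyRange_pyGetD' (p0 :: p1 :: rest) [] pvStepA _ (by norm_num : (0:Int) ≤ 1)]
  rw [show ((1:Int)).toNat = 1 from rfl, show List.drop 1 (p0 :: p1 :: rest) = p1 :: rest from rfl]
  rw [show ([PySem.List.pyGetD (p0 :: p1 :: rest) 0 []], s, ((p0 :: p1 :: rest).length : Int) - 1)
      = ([p0], s, ((p1 :: rest).length : Int)) from by
    simp [PySem.List.pyGetD_zero_cons]]
  rw [pv_loopA (p1 :: rest) [p0] 1 s (le_of_lt hspos) (by simp)]
  simp only [Int.toNat_zero, List.replicate_zero, List.append_nil]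
  -- B side: the insert loop appends fresh closed-form keys
  have hkey1 : ∀ j : Int, 1 ≤ j → 1 ≤ j + j * b + min j e := by
    intro j hj
    have h1 : 0 ≤ j * b := mul_nonneg (by omega) hb0
    have h2 : 0 ≤ min j e := by omega
    omega
  have hfresh : ∀ j ∈ PySem.List.pyRange 1 ((p0 :: p1 :: rest).length : Int) 1,
      (PySem.Dict.empty.insert 0 p0).contains (j + j * b + min j e) = false := by
    intro j hj
    have hj1 := (PySem.List.mem_pyRange_one.mp hj).1
    have hk := hkey1 j hj1
    simp only [PySem.Dict.contains_insert, PySem.Dict.contains_empty, Bool.or_false]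
    rw [beq_eq_false_iff_ne]
    omega
  have hnodup : ((PySem.List.pyRange 1 ((p0 :: p1 :: rest).length : Int) 1).map
      (fun j => j + j * b + min j e)).Nodup := by
    have hp := PySem.List.pairwise_lt_pyRange_one (a := 1) (b := ((p0 :: p1 :: rest).length : Int))
    exact ((hp.map _ (fun x y h => pv_key_mono b e x y hb0 h))).imp ne_of_lt
  have hitems := PySem.Dict.items_foldl_insert_fresh
    (l := PySem.List.pyRange 1 ((p0 :: p1 :: rest).length : Int) 1)
    (k := fun j => j + j * b + min j e)
    (v := fun j => PySem.List.pyGetD (p0 :: p1 :: rest) j [])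
    (d := PySem.Dict.empty.insert 0 p0) hfresh hnodup
  have hdict : (PySem.List.pyRange 1 ((p0 :: p1 :: rest).length : Int) 1).foldl
      (fun d j => d.insert (j + j * b + min j e) (PySem.List.pyGetD (p0 :: p1 :: rest) j []))
      (PySem.Dict.empty.insert 0 p0)
      = PySem.Dict.mk ((0, p0) :: (PySem.List.pyRange 1 ((p0 :: p1 :: rest).length : Int) 1).map
          (fun j => (j + j * b + min j e, PySem.List.pyGetD (p0 :: p1 :: rest) j []))) := by
    apply PySem.Dict.ext
    rw [hitems]
    rfl
  rw [hdict]
  -- render the dict day by day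
  have hkeyub : ∀ j : Int, j < ((p0 :: p1 :: rest).length : Int) → j + j * b + min j e < nights + 1 := by
    intro j hj
    have h1 : j * b ≤ b * (((p0 :: p1 :: rest).length : Int) - 1) := by
      rw [mul_comm]
      exact mul_le_mul_of_nonneg_left (by omega) hb0
    have h2 : min j e ≤ e := min_le_right _ _
    omega
  have hrender := pv_render ((0, p0) :: (PySem.List.pyRange 1 ((p0 :: p1 :: rest).length : Int) 1).map
      (fun j => (j + j * b + min j e, PySem.List.pyGetD (p0 :: p1 :: rest) j [])))
    0 (nights + 1)
    (by
      constructor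
      · intro q hq
        obtain ⟨j, hj, rfl⟩ := List.mem_map.mp hq
        have hj1 := (PySem.List.mem_pyRange_one.mp hj).1
        have := hkey1 j hj1
        show (0:Int) < j + j * b + min j e
        omega
      · exact List.Pairwise.map _
          (fun x y h => pv_key_mono b e x y hb0 h)
          (PySem.List.pairwise_lt_pyRange_one 1 ((p0 :: p1 :: rest).length : Int)))
    (by
      intro q hq
      rcases List.mem_cons.mp hq with h | h
      · rw [h]; constructor
        · simp
        · simp; omega
      · obtain ⟨j, hj, rfl⟩ := List.mem_map.mp h
        have hj1 := (PySem.List.mem_pyRange_one.mp hj).1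
        have hj2 := (PySem.List.mem_pyRange_one.mp hj).2
        exact ⟨by have := hkey1 j hj1; omega, hkeyub j hj2⟩)
  rw [hrender]
  -- identify the two timelines
  simp only [pvSeg, sub_zero, Int.toNat_zero, List.replicate_zero, List.nil_append, zero_add]
  rw [show ((p1 :: rest).length : Int) = ((p0 :: p1 :: rest).length : Int) - 1 from by
    simp only [List.length_cons]; push_cast; ring]
  rw [show (1 + s + (((p0 :: p1 :: rest).length : Int) - 1)) = nights + 1 from by omega]
  have hent := pv_entries_closed (p0 :: p1 :: rest) s (rest.length + 1) (by simp) (by omega)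
    (rest.length + 1) 1 (by omega) (le_refl 1)
  rw [show ((rest.length + 1 : Nat) : Int) = ((p0 :: p1 :: rest).length : Int) - 1 from by
    push_cast [hlen]; ring] at hent
  rw [← hbdef, ← hedef] at hent
  simp only [List.drop_succ_cons, List.drop_zero, Nat.cast_one] at hent
  norm_num at hent
  rw [show min (0:Int) e = 0 from by omega] at hent
  rw [show (rest.length : Int) + 1 = ((p0 :: p1 :: rest).length : Int) - 1 from by omega] at hent
  rw [show ((p0 :: p1 :: rest).length : Int) - 1 + 1 = ((p0 :: p1 :: rest).length : Int) from by
    ring] at hent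
  simp only [add_zero, sub_zero] at hent
  rw [hent]

-- ===== VERDICT (by name: the statement is the Claim_ definition above) =====
theorem insert_sea_days_spec : Claim_equal_insert_sea_days := by
  intro ports nights _hdom
  unfold Spec_insert_sea_days
  match ports with
  | [] =>
    simp only [insert_sea_days, insert_sea_days_alt, PySem.List.len_eq]
    by_cases h : nights + 1 - (([] : List (List (String × String))).length : Int) ≤ 0
    · rw [if_pos h, if_pos h]
    · rw [if_neg h, if_neg h, if_pos (by simp)]
      have hr := pv_render [] 0 (nights + 1) (by simp) (by simp)
      rw [show (PySem.Dict.mk ([] : List (Int × List (String × String)))) = PySem.Dict.empty from rfl] at hr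
      rw [hr]
      simp [pvSeg]
  | [p0] =>
    simp only [insert_sea_days, insert_sea_days_alt, PySem.List.len_eq]
    by_cases h : nights + 1 - (([p0] : List (List (String × String))).length : Int) ≤ 0
    · rw [if_pos h, if_pos h]
    · rw [if_neg h, if_neg h, if_neg (by simp), if_pos (by simp)]
      simp only [show ¬ 1 < ([p0] : List (List (String × String))).length from by simp, if_false]
      have htot : (0:Int) < nights + 1 := by simp at h; omega
      have hmk : (PySem.Dict.empty.insert (0:Int) p0) = PySem.Dict.mk [(0, p0)] := rfl
      have hr := pv_render [(0, p0)] 0 (nights + 1) (by simp) (by simp; omega)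
      rw [hmk, hr]
      simp only [pvSeg, sub_zero, Int.toNat_zero, List.replicate_zero, List.nil_append,
        PySem.List.pyGetD_zero_cons, List.length_cons, List.length_nil,
        List.singleton_append, List.cons.injEq, true_and]
      norm_num
  | p0 :: p1 :: rest =>
    by_cases hsea : nights + 1 - ((p0 :: p1 :: rest).length : Int) ≤ 0
    · simp only [insert_sea_days, insert_sea_days_alt, PySem.List.len_eq]
      rw [if_pos hsea, if_pos hsea]
    · exact pv_main p0 p1 rest nights hsea
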